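-- pv_equiv track=rewrite | github.com/sethdheer/CBSEclass10Helper | app.py | split_into_questions
-- ===== SOURCE A (Python) =====
-- from typing import Dict, List, Optional, Tuple
--
-- def split_into_questions(text: str) -> List[str]:
--     # Heuristic: build question chunks separated by blank lines / question endings.
--     candidates: List[str] = []
--     buffer: List[str] = []
--     for line in text.splitlines():
--         stripped = line.strip()
--         if not stripped:
--             if buffer:
--                 chunk = " ".join(buffer).strip()
--                 if chunk:
--                     candidates.append(chunk)
--                 buffer = []
--             continue
--         buffer.append(stripped)
--         if stripped.endswith("?"):
--             chunk = " ".join(buffer).strip()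
--             if chunk:
--                 candidates.append(chunk)
--             buffer = []
--
--     if buffer:
--         chunk = " ".join(buffer).strip()
--         if chunk:
--             candidates.append(chunk)
--
--     # Filter out very short chunks
--     return [c for c in candidates if len(c.split()) >= 4]
-- ===== SOURCE B (Python) =====
-- from typing import List, Tuple
--
--
-- def _split_chunk(lines: List[str]) -> Tuple[List[str], List[str]]:
--     """Split off the leading chunk of a block of stripped lines:
--     chunk lines up to (and including) the first '?'-ending line, stopping
--     before a blank line or the end of the list."""
--     if not lines or not lines[0]:
--         return [], lines
--     head, rest = lines[0], lines[1:]
--     if head.endswith("?"):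
--         return [head], rest
--     chunk, remainder = _split_chunk(rest)
--     return [head] + chunk, remainder
--
--
-- def _chunks(lines: List[str]) -> List[str]:
--     """Recursively turn a list of stripped lines into question chunks."""
--     if not lines:
--         return []
--     if not lines[0]:
--         return _chunks(lines[1:])
--     chunk, rest = _split_chunk(lines)
--     return [" ".join(chunk)] + _chunks(rest)
--
--
-- def split_into_questions(text: str) -> List[str]:
--     stripped = [line.strip() for line in text.splitlines()]
--     return [c for c in _chunks(stripped) if len(c.split()) >= 4]
-- ===== Notes on version B (the rewrite author's own statement) =====
-- stated objective: alternative
-- what changed: Replaces A's single imperative loop over (candidates, buffer) state with a recursive top-down decomposition: strip all lines first, then a recursive chunker that splits off the leading chunk of each block (via a helper returning chunk lines and remainder) and recurses on the rest.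
import Mathlib
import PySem

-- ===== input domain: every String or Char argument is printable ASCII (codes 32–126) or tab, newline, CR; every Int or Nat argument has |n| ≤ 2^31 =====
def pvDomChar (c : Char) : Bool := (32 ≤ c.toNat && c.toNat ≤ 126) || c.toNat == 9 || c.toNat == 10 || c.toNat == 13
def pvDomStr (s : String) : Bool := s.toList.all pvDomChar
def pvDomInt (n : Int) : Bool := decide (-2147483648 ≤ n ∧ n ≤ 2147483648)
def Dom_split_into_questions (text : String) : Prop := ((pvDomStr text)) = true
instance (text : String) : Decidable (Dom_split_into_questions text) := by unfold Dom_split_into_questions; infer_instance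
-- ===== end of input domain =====

-- B re-implements A's imperative buffer/flush loop as a recursive top-down chunker
-- (split off the leading chunk of each block, recurse on the rest): same values, different decomposition.

-- ===== PORT A =====
-- chunk = " ".join(buffer).strip(); if chunk: candidates.append(chunk)
def pvFlushA (candidates buffer : List String) : List String :=
  let chunk := PySem.Str.strip (PySem.Str.join " " buffer)
  if chunk ≠ "" then candidates ++ [chunk] else candidates

-- one iteration of A's for-loop over (candidates, buffer)
def pvStepA (st : List String × List String) (line : String) : List String × List String :=
  let stripped := PySem.Str.strip line
  if stripped = "" then
    if st.2 ≠ [] then (pvFlushA st.1 st.2, []) else st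
  else
    let buffer := st.2 ++ [stripped]
    if PySem.Str.endswith stripped "?" then (pvFlushA st.1 buffer, [])
    else (st.1, buffer)

def split_into_questions (text : String) : List String :=
  let st := (PySem.Str.splitlines text).foldl pvStepA ([], [])
  let candidates := if st.2 ≠ [] then pvFlushA st.1 st.2 else st.1
  candidates.filter fun c => decide (4 ≤ PySem.List.len (PySem.Str.split₀ c))

-- ===== PORT B =====
-- _split_chunk: split off the leading chunk of a block of stripped lines
def pvSplitChunk : List String → List String × List String
  | [] => ([], [])
  | head :: rest =>
    if head = "" then ([], head :: rest)
    else if PySem.Str.endswith head "?" then ([head], rest)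
    else
      let p := pvSplitChunk rest
      (head :: p.1, p.2)

lemma pvSplitChunk_snd_le : ∀ ls : List String, (pvSplitChunk ls).2.length ≤ ls.length := by
  intro ls
  induction ls with
  | nil => simp [pvSplitChunk]
  | cons h t ih =>
    by_cases h1 : h = "" <;> by_cases h2 : PySem.Chars.endswith h.toList ['?'] = true <;>
      simp [pvSplitChunk, h1, h2] <;> omega

lemma pvSplitChunk_snd_lt (s : String) (rest : List String) (h : ¬ s = "") :
    ((pvSplitChunk (s :: rest)).2).length < (s :: rest).length := by
  have := pvSplitChunk_snd_le rest
  by_cases h2 : PySem.Chars.endswith s.toList ['?'] = true <;> simp [pvSplitChunk, h, h2] <;> omega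

-- _chunks: recursively turn the list of stripped lines into question chunks
def pvChunks (lines : List String) : List String :=
  match lines with
  | [] => []
  | s :: rest =>
    if h : s = "" then pvChunks rest
    else
      PySem.Str.join " " (pvSplitChunk (s :: rest)).1 :: pvChunks (pvSplitChunk (s :: rest)).2
termination_by lines.length
decreasing_by
  · simp
  · exact pvSplitChunk_snd_lt s rest h

def split_into_questions_alt (text : String) : List String :=
  let stripped := (PySem.Str.splitlines text).map PySem.Str.strip
  (pvChunks stripped).filter fun c => decide (4 ≤ PySem.List.len (PySem.Str.split₀ c))

-- ===== PRECONDITION & SPEC =====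
def Spec_split_into_questions (text : String) (out : List String) : Prop := out = split_into_questions_alt text
instance (text : String) (out : List String) : Decidable (Spec_split_into_questions text out) := by unfold Spec_split_into_questions; infer_instance

-- ===== CLAIM (what is proved, stated in full; the proofs are below) =====
def Claim_equal_split_into_questions : Prop := ∀ (text : String), Dom_split_into_questions text → Spec_split_into_questions text (split_into_questions text)

-- ===== LEMMAS AND PROOFS =====

lemma pv_dropWhile_eq_self {p : Char → Bool} (l : List Char)
    (h : ∀ c ∈ l.head?, p c = false) : List.dropWhile p l = l := by
  cases l with
  | nil => rfl
  | cons a t =>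
    have : p a = false := h a (by simp)
    simp [this]

lemma pv_head?_dropWhile {p : Char → Bool} :
    ∀ (l : List Char), ∀ c ∈ (List.dropWhile p l).head?, p c = false := by
  intro l
  induction l with
  | nil => simp [List.dropWhile]
  | cons a t ih =>
    by_cases hp : p a = true
    · simpa [hp] using ih
    · simp at hp
      simp [hp]

def pvStripOk (cs : List Char) : Prop :=
  (∀ c ∈ cs.head?, PySem.Chars.isspace c = false) ∧
  (∀ c ∈ cs.getLast?, PySem.Chars.isspace c = false)

lemma pv_strip_eq_self (cs : List Char) (h : pvStripOk cs) : PySem.Chars.strip cs = cs := by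
  unfold PySem.Chars.strip PySem.Chars.rstrip PySem.Chars.lstrip
  rw [pv_dropWhile_eq_self cs h.1,
      pv_dropWhile_eq_self cs.reverse (by simpa [List.head?_reverse] using h.2),
      List.reverse_reverse]

lemma pv_stripOk_strip (cs : List Char) : pvStripOk (PySem.Chars.strip cs) := by
  have hsub : PySem.Chars.strip cs =
      (List.dropWhile PySem.Chars.isspace (PySem.Chars.lstrip cs).reverse).reverse := rfl
  obtain ⟨t, ht⟩ := List.dropWhile_suffix (l := (PySem.Chars.lstrip cs).reverse) PySem.Chars.isspace
  constructor
  · intro c hc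
    -- head of strip is head of lstrip cs, which dropWhile guarantees non-space
    have hx : PySem.Chars.lstrip cs =
        (List.dropWhile PySem.Chars.isspace (PySem.Chars.lstrip cs).reverse).reverse ++ t.reverse := by
      have := congrArg List.reverse ht
      simpa using this.symm
    have : c ∈ (PySem.Chars.lstrip cs).head? := by
      rw [hx, List.head?_append, ← hsub]
      simp at hc ⊢
      exact Or.inl hc
    exact pv_head?_dropWhile cs c this
  · intro c hc
    rw [hsub, List.getLast?_reverse] at hc
    exact pv_head?_dropWhile _ c hc

-- invariant carried by A's buffer: every buffered line is non-empty, already stripped,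
-- and does not end with '?'
def pvGood (b : String) : Prop :=
  b ≠ "" ∧ pvStripOk b.toList ∧ PySem.Chars.endswith b.toList ['?'] = false

lemma pv_join_ok : ∀ bs : List (List Char), bs ≠ [] → (∀ b ∈ bs, b ≠ [] ∧ pvStripOk b) →
    PySem.Chars.join [' '] bs ≠ [] ∧ pvStripOk (PySem.Chars.join [' '] bs) := by
  intro bs
  induction bs with
  | nil => simp
  | cons b rest ih =>
    intro _ h
    cases rest with
    | nil =>
      simpa [PySem.Chars.join_singleton] using h b (by simp)
    | cons b' rest' =>
      have hb := h b (by simp)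
      have hrest := ih (by simp) (fun x hx => h x (by simp [hx]))
      rw [PySem.Chars.join_cons_cons]
      have hJ : PySem.Chars.join [' '] (b' :: rest') ≠ [] := hrest.1
      refine ⟨by simp [hb.1], ?_, ?_⟩
      · intro c hc
        rw [List.append_assoc, List.head?_append] at hc
        cases b with
        | nil => exact absurd rfl hb.1
        | cons a tb =>
          simp at hc
          exact hb.2.1 c (by simp [hc])
      · intro c hc
        rw [List.append_assoc, List.getLast?_append, List.getLast?_append] at hc
        have : (PySem.Chars.join [' '] (b' :: rest')).getLast?.isSome := by
          simpa [List.getLast?_isSome] using hJ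
        obtain ⟨c0, hc0⟩ := Option.isSome_iff_exists.mp this
        rw [hc0] at hc
        simp at hc
        exact hrest.2.2 c (by simp [hc, hc0])

lemma pv_flush_chunk (buf : List String) (hne : buf ≠ [])
    (h : ∀ b ∈ buf, b ≠ "" ∧ pvStripOk b.toList) :
    PySem.Str.strip (PySem.Str.join " " buf) = PySem.Str.join " " buf ∧
      PySem.Str.join " " buf ≠ "" := by
  have hsep : (" " : String).toList = [' '] := rfl
  have hb : ∀ bl ∈ buf.map String.toList, bl ≠ [] ∧ pvStripOk bl := by
    intro bl hbl
    obtain ⟨b, hbmem, rfl⟩ := List.mem_map.mp hbl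
    exact ⟨fun h0 => (h b hbmem).1 (String.toList_eq_nil_iff.mp h0), (h b hbmem).2⟩
  have hj := pv_join_ok (buf.map String.toList) (by simpa) hb
  constructor
  · rw [← String.toList_inj, PySem.Str.toList_strip, PySem.Str.toList_join, hsep]
    exact pv_strip_eq_self _ hj.2
  · intro h0
    apply hj.1
    have := congrArg String.toList h0
    rw [PySem.Str.toList_join, hsep] at this
    simpa using this

lemma pv_flushA_eq (cand buf : List String) (hne : buf ≠ [])
    (h : ∀ b ∈ buf, b ≠ "" ∧ pvStripOk b.toList) :
    pvFlushA cand buf = cand ++ [PySem.Str.join " " buf] := by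
  obtain ⟨h1, h2⟩ := pv_flush_chunk buf hne h
  simp [pvFlushA, h1, h2]

lemma pv_splitChunk_prepend : ∀ (buf t : List String),
    (∀ b ∈ buf, b ≠ "" ∧ PySem.Chars.endswith b.toList ['?'] = false) →
    pvSplitChunk (buf ++ t) = (buf ++ (pvSplitChunk t).1, (pvSplitChunk t).2) := by
  intro buf
  induction buf with
  | nil => simp
  | cons b buf' ih =>
    intro t h
    have hb := h b (by simp)
    have := ih t (fun x hx => h x (by simp [hx]))
    simp [pvSplitChunk, hb.1, hb.2, this]

lemma pvChunks_nil : pvChunks [] = [] := by simp [pvChunks]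

lemma pvChunks_blank (t : List String) : pvChunks ("" :: t) = pvChunks t := by
  rw [pvChunks]
  simp

lemma pvChunks_cons_ne (s : String) (t : List String) (h : s ≠ "") :
    pvChunks (s :: t) =
      PySem.Str.join " " (pvSplitChunk (s :: t)).1 :: pvChunks (pvSplitChunk (s :: t)).2 := by
  rw [pvChunks]
  simp [h]

lemma pvChunks_append_buf (buf t : List String) (hne : buf ≠ [])
    (hb : ∀ b ∈ buf, pvGood b) :
    pvChunks (buf ++ t) =
      PySem.Str.join " " (buf ++ (pvSplitChunk t).1) :: pvChunks (pvSplitChunk t).2 := by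
  cases buf with
  | nil => exact absurd rfl hne
  | cons b buf' =>
    have hgb := hb b (by simp)
    have hpre := pv_splitChunk_prepend (b :: buf') t
      (fun x hx => ⟨(hb x hx).1, (hb x hx).2.2⟩)
    rw [List.cons_append, pvChunks_cons_ne b (buf' ++ t) hgb.1, ← List.cons_append, hpre]

lemma pv_main : ∀ (ls : List String) (cand buf : List String), (∀ b ∈ buf, pvGood b) →
    (let st := ls.foldl pvStepA (cand, buf)
     if st.2 ≠ [] then pvFlushA st.1 st.2 else st.1) =
      cand ++ pvChunks (buf ++ ls.map PySem.Str.strip) := by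
  intro ls
  induction ls with
  | nil =>
    intro cand buf hinv
    by_cases hb : buf = []
    · simp [hb, pvChunks_nil]
    · have hflush := pv_flushA_eq cand buf hb (fun b hbm => ⟨(hinv b hbm).1, (hinv b hbm).2.1⟩)
      have := pvChunks_append_buf buf [] hb hinv
      simp only [List.map_nil, List.foldl_nil, this]
      simp [hb, hflush, pvSplitChunk, pvChunks_nil]
  | cons l ls' ih =>
    intro cand buf hinv
    simp only [List.foldl_cons, List.map_cons]
    by_cases hs : PySem.Str.strip l = ""
    · -- blank line: flush the buffer (if any)
      by_cases hb : buf = []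
      · rw [show pvStepA (cand, buf) l = (cand, buf) by simp [pvStepA, hs, hb]]
        rw [hb]
        rw [ih cand [] (by simp)]
        simp [hs, pvChunks_blank]
      · rw [show pvStepA (cand, buf) l = (pvFlushA cand buf, []) by simp [pvStepA, hs, hb]]
        rw [ih (pvFlushA cand buf) [] (by simp)]
        rw [pv_flushA_eq cand buf hb (fun b hbm => ⟨(hinv b hbm).1, (hinv b hbm).2.1⟩)]
        rw [hs, pvChunks_append_buf buf _ hb hinv]
        simp [pvSplitChunk, pvChunks_blank]
    · have hok : pvStripOk (PySem.Str.strip l).toList := by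
        rw [PySem.Str.toList_strip]; exact pv_stripOk_strip _
      by_cases hq : PySem.Chars.endswith (PySem.Chars.strip l.toList) ['?'] = true
      · -- '?'-terminated line: append then flush
        rw [show pvStepA (cand, buf) l = (pvFlushA cand (buf ++ [PySem.Str.strip l]), []) by
          simp [pvStepA, hs, hq]]
        rw [ih _ [] (by simp)]
        rw [pv_flushA_eq cand (buf ++ [PySem.Str.strip l])
          (by simp) (by
            intro b hbm
            rcases List.mem_append.mp hbm with hbm | hbm
            · exact ⟨(hinv b hbm).1, (hinv b hbm).2.1⟩
            · simp at hbm; subst hbm; exact ⟨hs, hok⟩)]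
        by_cases hb : buf = []
        · rw [hb]
          simp only [List.nil_append]
          rw [pvChunks_cons_ne _ _ hs]
          simp [pvSplitChunk, hs, hq]
        · rw [pvChunks_append_buf buf _ hb hinv]
          simp [pvSplitChunk, hs, hq]
      · -- ordinary line: it joins the buffer
        rw [show pvStepA (cand, buf) l = (cand, buf ++ [PySem.Str.strip l]) by
          simp [pvStepA, hs, hq]]
        rw [ih cand (buf ++ [PySem.Str.strip l]) (by
          intro b hbm
          rcases List.mem_append.mp hbm with hbm | hbm
          · exact hinv b hbm
          · simp at hbm; subst hbm
            exact ⟨hs, hok, by simpa using hq⟩)]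
        simp

-- ===== VERDICT (by name: the statement is the Claim_ definition above) =====
theorem split_into_questions_spec : Claim_equal_split_into_questions := by
  intro text _
  unfold Spec_split_into_questions split_into_questions split_into_questions_alt
  have := pv_main (PySem.Str.splitlines text) [] [] (by simp)
  simp only at this ⊢
  rw [this]
  simp
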